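-- pv_equiv track=rewrite | github.com/pranavjadhav001/Face-speech-gait | embed.py | labeler
-- ===== SOURCE A (Python) =====
-- def labeler(list):
--         label_dict={}
--         cnt=1
--         for i in list:
--             if i not in label_dict:
--                 label_dict[i] = cnt
--                 cnt+=1
--             else:
--                 pass
--         return label_dict
-- ===== SOURCE B (Python) =====
-- def labeler(list):
--     return {k: len(set(list[:pos + 1]))
--             for pos, k in enumerate(list)
--             if k not in list[:pos]}
-- ===== Notes on version B (the rewrite author's own statement) =====
-- stated objective: alternative
-- what changed: Replaces A's stateful single pass (mutating a dict while incrementing a counter) by a per-position closed formula: each first occurrence (k not in list[:pos]) is labelled len(set(list[:pos+1])), the number of distinct items in its prefix, computed from slices with no counter and no incrementally built membership dict.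
import Mathlib
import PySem

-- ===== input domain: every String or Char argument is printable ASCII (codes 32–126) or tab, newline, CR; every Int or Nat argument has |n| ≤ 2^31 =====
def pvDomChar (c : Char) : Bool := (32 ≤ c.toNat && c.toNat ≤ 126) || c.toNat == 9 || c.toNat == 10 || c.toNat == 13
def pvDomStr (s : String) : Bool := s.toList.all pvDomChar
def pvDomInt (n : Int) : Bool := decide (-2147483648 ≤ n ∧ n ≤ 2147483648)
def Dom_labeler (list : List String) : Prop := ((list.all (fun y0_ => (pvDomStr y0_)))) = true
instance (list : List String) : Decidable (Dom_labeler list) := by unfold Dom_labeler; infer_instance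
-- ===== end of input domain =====

-- B drops A's counter/dict pass: a first occurrence (k not in list[:pos]) is labelled by the
-- closed formula len(set(list[:pos+1])), the number of distinct items in the prefix (alternative decomposition).


-- ===== PORT A =====
-- loop state (label_dict, cnt); per item: if i not in label_dict: label_dict[i] = cnt; cnt += 1
def labelerStep (st : PySem.Dict String Int × Int) (i : String) : PySem.Dict String Int × Int :=
  if !(st.1.contains i) then (st.1.insert i st.2, st.2 + 1) else st

def labeler (list : List String) : List (String × Int) :=
  (list.foldl labelerStep (PySem.Dict.empty, 1)).1.items

-- ===== PORT B =====
-- {k: len(set(list[:pos + 1])) for pos, k in enumerate(list) if k not in list[:pos]}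
def labelerAltStep (list : List String) (d : PySem.Dict String Int) (p : Int × String) :
    PySem.Dict String Int :=
  if !(PySem.List.slice list none (some p.1)).contains p.2 then
    d.insert p.2 (((PySem.Set.ofList (PySem.List.slice list none (some (p.1 + 1)))).length : Int))
  else d

def labeler_alt (list : List String) : List (String × Int) :=
  ((PySem.List.enumerate list 0).foldl (labelerAltStep list) PySem.Dict.empty).items

-- ===== PRECONDITION & SPEC =====
def Spec_labeler (list : List String) (out : List (String × Int)) : Prop := out = labeler_alt list
instance (list : List String) (out : List (String × Int)) : Decidable (Spec_labeler list out) := by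
  unfold Spec_labeler; infer_instance

-- ===== CLAIM =====
def Claim_equal_labeler : Prop := ∀ (list : List String), Dom_labeler list → Spec_labeler list (labeler list)

-- ===== LEMMAS AND PROOFS =====

-- the common canonical value: the distinct items in first-appearance order, labelled 1..n
def lab (l : List String) : List (String × Int) :=
  (PySem.List.enumerate (PySem.Set.ofList l) 1).map (fun p => (p.2, p.1))

theorem ofList_snoc (pre : List String) (x : String) :
    PySem.Set.ofList (pre ++ [x]) = PySem.Set.add (PySem.Set.ofList pre) x := by
  rw [PySem.Set.ofList_eq_foldl, PySem.Set.ofList_eq_foldl, List.foldl_append]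
  rfl

theorem lab_append_mem (pre : List String) (x : String) (hx : x ∈ pre) :
    lab (pre ++ [x]) = lab pre := by
  unfold lab
  rw [ofList_snoc]
  simp [PySem.Set.add, hx]

theorem lab_append_not_mem (pre : List String) (x : String) (hx : x ∉ pre) :
    lab (pre ++ [x]) = lab pre ++ [(x, ((PySem.Set.ofList (pre ++ [x])).length : Int))] := by
  unfold lab
  rw [ofList_snoc]
  simp only [PySem.Set.add, PySem.Set.contains_eq_listContains, List.contains_eq_mem,
    PySem.Set.mem_ofList, hx, decide_false, Bool.false_eq_true, if_false,
    PySem.List.enumerate_append, List.map_append]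
  simp [PySem.List.enumerate_cons]
  omega

-- B's loop: processing the suffix from a dict that already holds lab pre yields lab (pre ++ suf)
theorem loopB (suf pre : List String) (d : PySem.Dict String Int)
    (hd : d.items = lab pre) :
    ((PySem.List.enumerate suf (pre.length : Int)).foldl
        (labelerAltStep (pre ++ suf)) d).items = lab (pre ++ suf) := by
  induction suf generalizing pre d with
  | nil => simpa using hd
  | cons x t ih =>
    rw [PySem.List.enumerate_cons, List.foldl_cons]
    have hslice : PySem.List.slice (pre ++ x :: t) none (some (pre.length : Int)) = pre := by
      rw [PySem.List.slice_to_natCast]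
      exact List.take_left ..
    have hslice1 : PySem.List.slice (pre ++ x :: t) none (some ((pre.length : Int) + 1))
        = pre ++ [x] := by
      have h1 : (pre.length : Int) + 1 = ((pre.length + 1 : Nat) : Int) := by push_cast; ring
      rw [h1, PySem.List.slice_to_natCast, List.take_append]
      simp
    have hlen : ((pre ++ [x]).length : Int) = (pre.length : Int) + 1 := by
      simp
    have happ : (pre ++ [x]) ++ t = pre ++ x :: t := by simp
    by_cases hx : x ∈ pre
    · have hstep : labelerAltStep (pre ++ x :: t) d ((pre.length : Int), x) = d := by
        simp [labelerAltStep, hslice, hx]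
      rw [hstep]
      have := ih (pre ++ [x]) d (by rw [hd, lab_append_mem pre x hx])
      rw [hlen, happ] at this
      exact this
    · have hcont : d.contains x = false := by
        rw [PySem.Dict.contains_eq_decide_mem_keys]
        have hk : d.keys = PySem.Set.ofList pre := by
          show d.items.map (·.1) = _
          rw [hd]
          unfold lab
          rw [List.map_map]
          exact PySem.List.map_snd_enumerate _ _
        rw [hk]
        simp only [decide_eq_false_iff_not, PySem.Set.mem_ofList]
        exact hx
      have hstep : labelerAltStep (pre ++ x :: t) d ((pre.length : Int), x)
          = d.insert x ((PySem.Set.ofList (pre ++ [x])).length : Int) := by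
        simp [labelerAltStep, hslice, hslice1, hx]
      rw [hstep]
      have hd' : (d.insert x ((PySem.Set.ofList (pre ++ [x])).length : Int)).items
          = lab (pre ++ [x]) := by
        rw [PySem.Dict.items_insert_of_not_contains d _ hcont, hd,
          lab_append_not_mem pre x hx]
      have := ih (pre ++ [x]) _ hd'
      rw [hlen, happ] at this
      exact this

-- A's loop from an arbitrary state appends the not-yet-seen items, labelled cnt, cnt+1, …
theorem ofList_filter {α : Type} [BEq α] [LawfulBEq α] (p : α → Bool) (r : List α) :
    PySem.Set.ofList (r.filter p) = (PySem.Set.ofList r).filter p := by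
  induction r with
  | nil => rfl
  | cons a t ih =>
    by_cases hp : p a
    · simp only [List.filter_cons, hp, PySem.Set.ofList_cons, PySem.Set.discard, ih, if_true]
      rw [List.filter_comm]
    · simp only [List.filter_cons, hp, PySem.Set.ofList_cons, PySem.Set.discard, ih,
        Bool.false_eq_true, if_false]
      rw [List.filter_filter]
      apply List.filter_congr
      intro y hy
      by_cases hya : y = a
      · subst hya
        simp [hp]
      · simp [hya]

theorem loopA_items (l : List String) (d : PySem.Dict String Int) (cnt : Int) :
    (l.foldl labelerStep (d, cnt)).1.items
      = d.items ++ (PySem.List.enumerate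
          (PySem.Set.ofList (l.filter (fun x => !d.contains x))) cnt).map (fun p => (p.2, p.1)) := by
  induction l generalizing d cnt with
  | nil => simp
  | cons x t ih =>
    by_cases h : d.contains x
    · simp only [List.foldl_cons, labelerStep, h, Bool.not_true, Bool.false_eq_true, if_false,
        List.filter_cons]
      rw [ih]
    · have h' : d.contains x = false := by simpa using h
      simp only [List.foldl_cons, labelerStep, h', Bool.not_false, if_true]
      rw [ih]
      have hfil : t.filter (fun y => !(d.insert x cnt).contains y)
          = (t.filter (fun y => !d.contains y)).filter (fun y => decide ¬(y = x)) := by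
        rw [List.filter_filter]
        apply List.filter_congr
        intro y _
        rw [PySem.Dict.contains_insert]
        by_cases hyx : y = x <;> simp [hyx]
      rw [hfil, ofList_filter, PySem.Dict.items_insert_of_not_contains d cnt h']
      simp only [List.filter_cons, h', Bool.not_false, if_true, PySem.Set.ofList_cons,
        PySem.List.enumerate_cons, List.map_cons, List.append_assoc, List.singleton_append,
        PySem.Set.discard]
      simp [Bool.beq_eq_decide_eq]

-- ===== VERDICT =====
theorem labeler_spec : Claim_equal_labeler := by
  intro list _
  unfold Spec_labeler labeler labeler_alt
  rw [loopA_items]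
  have hB := loopB list [] PySem.Dict.empty (by rfl)
  simp only [List.nil_append, List.length_nil, Nat.cast_zero] at hB
  rw [hB]
  simp [lab, PySem.Dict.empty]
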